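-- pv_equiv track=rewrite | github.com/97gamjak/stockMarket | stockMarket/ib/finReportsMerger.py | add_old_fiscal_data
-- ===== SOURCE A (Python) =====
-- def add_old_fiscal_data(annual_diff_lines, backup_data):
--     new_data = []
--     append_data = False
--     for line in annual_diff_lines:
--         append_data = False
--         for data_line in backup_data:
--             if data_line == line:
--                 append_data = True
--
--             if append_data:
--                 new_data.append(data_line)
--
--             if data_line.startswith("</FiscalPeriod>") and append_data:
--                 break
--
--     return new_data
-- ===== SOURCE B (Python) =====
-- def add_old_fiscal_data(annual_diff_lines, backup_data):
--     # One right-to-left pass indexes, for every distinct backup line, its first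
--     # occurrence and the end of its fiscal block; each diff line is then one
--     # dict lookup plus one slice.
--     blocks = {}
--     b = len(backup_data)
--     for i, d in reversed(list(enumerate(backup_data))):
--         if d.startswith("</FiscalPeriod>"):
--             b = i
--         blocks[d] = (i, b + 1)
--     new_data = []
--     for line in annual_diff_lines:
--         if line in blocks:
--             i, j = blocks[line]
--             new_data.extend(backup_data[i:j])
--     return new_data
-- ===== Notes on version B (the rewrite author's own statement) =====
-- stated objective: faster
-- what changed: Instead of rescanning backup_data from the start for every diff line, B makes one right-to-left pass that records, for each distinct backup line, its first occurrence index and the end of its fiscal-period block, then answers each diff line with one dict lookup and one slice.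
import Mathlib
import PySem

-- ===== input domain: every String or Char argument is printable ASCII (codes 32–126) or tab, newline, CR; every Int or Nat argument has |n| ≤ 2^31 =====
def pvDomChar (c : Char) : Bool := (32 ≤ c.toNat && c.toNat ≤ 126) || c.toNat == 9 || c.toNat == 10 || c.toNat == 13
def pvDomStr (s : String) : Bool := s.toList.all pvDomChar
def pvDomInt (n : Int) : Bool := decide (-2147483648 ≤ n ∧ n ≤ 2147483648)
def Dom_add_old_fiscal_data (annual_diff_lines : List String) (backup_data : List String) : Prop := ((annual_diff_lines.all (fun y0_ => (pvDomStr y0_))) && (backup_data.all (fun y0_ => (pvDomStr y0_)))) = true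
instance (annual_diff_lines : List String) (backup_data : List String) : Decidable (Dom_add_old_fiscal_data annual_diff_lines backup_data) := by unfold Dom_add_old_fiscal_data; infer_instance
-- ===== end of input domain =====

-- B replaces A's rescan of backup_data for every diff line by a single right-to-left
-- indexing pass (first occurrence + fiscal-block end per line) followed by O(1)
-- lookups and slices; objective: faster (asymptotic, O(n·m) → O(n+m+output)).

def pvBoundary (s : String) : Bool := PySem.Str.startswith s "</FiscalPeriod>"

-- ===== PORT A =====
-- inner 'for data_line in backup_data' loop with its early break
def pvInnerA (line : String) : List String → List String → Bool → List String
  | [], acc, _ => acc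
  | d :: rest, acc, flag =>
    let flag' := if d == line then true else flag
    let acc' := if flag' then acc ++ [d] else acc
    if pvBoundary d && flag' then acc' else pvInnerA line rest acc' flag'

def add_old_fiscal_data (annual_diff_lines : List String) (backup_data : List String) : List String :=
  annual_diff_lines.foldl (fun new_data line => pvInnerA line backup_data new_data false) []

-- ===== PORT B =====
-- one step of Source B's 'for i, d in reversed(list(enumerate(backup_data)))' loop
def pvStepB (st : PySem.Dict String (Int × Int) × Int) (p : Int × String) : PySem.Dict String (Int × Int) × Int :=
  let b := if pvBoundary p.2 then p.1 else st.2
  (st.1.insert p.2 (p.1, b + 1), b)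

def add_old_fiscal_data_alt (annual_diff_lines : List String) (backup_data : List String) : List String :=
  let st := ((PySem.List.enumerate backup_data).reverse).foldl pvStepB
      ((PySem.Dict.empty : PySem.Dict String (Int × Int)), (backup_data.length : Int))
  annual_diff_lines.foldl (fun new_data line =>
    match st.1.get? line with
    | some ij => new_data ++ PySem.List.slice backup_data (some ij.1) (some ij.2)
    | none => new_data) []

-- ===== PRECONDITION & SPEC =====
def Spec_add_old_fiscal_data (annual_diff_lines : List String) (backup_data : List String) (out : List String) : Prop := out = add_old_fiscal_data_alt annual_diff_lines backup_data
instance (annual_diff_lines : List String) (backup_data : List String) (out : List String) : Decidable (Spec_add_old_fiscal_data annual_diff_lines backup_data out) := by unfold Spec_add_old_fiscal_data; infer_instance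

-- ===== CLAIM (what is proved, stated in full; the proofs are below) =====
def Claim_equal_add_old_fiscal_data : Prop := ∀ (annual_diff_lines : List String) (backup_data : List String), Dom_add_old_fiscal_data annual_diff_lines backup_data → Spec_add_old_fiscal_data annual_diff_lines backup_data (add_old_fiscal_data annual_diff_lines backup_data)

-- ===== LEMMAS AND PROOFS =====

-- prefix of bs up to and including the first "</FiscalPeriod>" line (all of bs if none)
def takeThrough : List String → List String
  | [] => []
  | d :: r => if pvBoundary d then [d] else d :: takeThrough r

-- the lines A appends for one diff line: from its first occurrence through the block end
def blockOf (line : String) : List String → List String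
  | [] => []
  | d :: r => if d == line then takeThrough (d :: r) else blockOf line r

-- index of the first boundary line (length if none)
def boundIdx (l : List String) : Nat := (l.takeWhile (fun d => !pvBoundary d)).length

lemma takeThrough_eq_take (r : List String) : List.take (boundIdx r + 1) r = takeThrough r := by
  induction r with
  | nil => simp [takeThrough]
  | cons d r ih =>
    by_cases h : pvBoundary d = true
    · simp [takeThrough, boundIdx, h]
    · have hb : boundIdx (d :: r) = boundIdx r + 1 := by
        simp [boundIdx, h]
      rw [hb, List.take_succ_cons, ih]
      simp [takeThrough, h]

lemma pvInnerA_true (line : String) : ∀ (bs acc : List String),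
    pvInnerA line bs acc true = acc ++ takeThrough bs := by
  intro bs
  induction bs with
  | nil => intro acc; simp [pvInnerA, takeThrough]
  | cons d rest ih =>
    intro acc
    by_cases h : pvBoundary d = true
    · simp [pvInnerA, takeThrough, h]
    · simp [pvInnerA, takeThrough, h, ih]

lemma pvInnerA_false (line : String) : ∀ (bs acc : List String),
    pvInnerA line bs acc false = acc ++ blockOf line bs := by
  intro bs
  induction bs with
  | nil => intro acc; simp [pvInnerA, blockOf]
  | cons d rest ih =>
    intro acc
    by_cases hd : (d == line) = true
    · by_cases h : pvBoundary d = true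
      · simp [pvInnerA, blockOf, takeThrough, hd, h]
      · simp [pvInnerA, blockOf, takeThrough, hd, h, pvInnerA_true]
    · simp [pvInnerA, blockOf, hd, ih]

-- invariant of Source B's right-to-left pass, stated for the foldr form of the loop
lemma pvBuildInv (backup : List String) : ∀ (rest : List String) (k : Nat),
    rest = List.drop k backup → k ≤ backup.length →
    (let st := (PySem.List.enumerate rest (k : Int)).foldr (fun p st => pvStepB st p)
        ((PySem.Dict.empty : PySem.Dict String (Int × Int)), (backup.length : Int))
     st.2 = (k : Int) + (boundIdx rest : Int) ∧
     ∀ line, (match st.1.get? line with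
              | some ij => PySem.List.slice backup (some ij.1) (some ij.2)
              | none => ([] : List String)) = blockOf line rest) := by
  intro rest
  induction rest with
  | nil =>
    intro k hk hle
    have hkm : k = backup.length :=
      le_antisymm hle (List.drop_eq_nil_iff.mp hk.symm)
    constructor
    · simp [PySem.List.enumerate, boundIdx, hkm]
    · intro line
      simp [PySem.List.enumerate, PySem.Dict.get?_empty, blockOf]
  | cons d r ih =>
    intro k hk hle
    have hklt : k < backup.length := by
      by_contra h
      have hnil : List.drop k backup = [] := List.drop_eq_nil_iff.mpr (by omega)
      rw [hnil] at hk; exact (List.cons_ne_nil d r) hk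
    have hr : r = List.drop (k + 1) backup := by
      have := congrArg (List.drop 1) hk
      simpa [List.drop_drop, Nat.add_comm] using this
    obtain ⟨hsnd, hget⟩ := ih (k + 1) hr (by omega)
    push_cast at hsnd hget
    rw [PySem.List.enumerate_cons]
    simp only [List.foldr_cons]
    set st := (PySem.List.enumerate r ((k : Int) + 1)).foldr (fun p st => pvStepB st p)
        ((PySem.Dict.empty : PySem.Dict String (Int × Int)), (backup.length : Int)) with hst
    have hbI : ¬ pvBoundary d = true → boundIdx (d :: r) = boundIdx r + 1 := by
      intro h; simp [boundIdx, h]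
    have hb' : (if pvBoundary d then (k : Int) else st.2)
        = (k : Int) + (boundIdx (d :: r) : Int) := by
      by_cases h : pvBoundary d = true
      · simp [h, boundIdx]
      · rw [if_neg h, hsnd, hbI h]; push_cast; ring
    constructor
    · simpa [pvStepB] using hb'
    · intro line
      simp only [pvStepB]
      rw [PySem.Dict.get?_insert]
      by_cases hl : line = d
      · subst hl
        simp only [hb']
        have hslice : PySem.List.slice backup (some (k : Int))
            (some ((k : Int) + (boundIdx (line :: r) : Int) + 1))
            = takeThrough (line :: r) := by
          have hcast : ((k : Int) + (boundIdx (line :: r) : Int) + 1)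
              = (k : Int) + ((boundIdx (line :: r) + 1 : Nat) : Int) := by push_cast; ring
          rw [hcast, PySem.List.slice_natCast_add, ← hk, takeThrough_eq_take]
        simp [hslice, blockOf]
      · rw [if_neg hl]
        have hbl : blockOf line (d :: r) = blockOf line r := by
          have hne : (d == line) = false := by
            simp only [beq_eq_false_iff_ne]; exact fun h => hl h.symm
          simp [blockOf, hne]
        rw [hbl, ← hget line]

-- both ports compute foldl of appending blockOf
lemma foldl_block (backup : List String) (f : List String → String → List String)
    (hf : ∀ acc line, f acc line = acc ++ blockOf line backup) :
    ∀ (diff acc : List String), diff.foldl f acc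
      = diff.foldl (fun nd line => nd ++ blockOf line backup) acc := by
  intro diff
  induction diff with
  | nil => intro acc; rfl
  | cons l diff ih => intro acc; simp only [List.foldl_cons, hf, ih]

-- ===== VERDICT (by name: the statement is the Claim_ definition above) =====
theorem add_old_fiscal_data_spec : Claim_equal_add_old_fiscal_data := by
  intro diff backup _
  show add_old_fiscal_data diff backup = add_old_fiscal_data_alt diff backup
  unfold add_old_fiscal_data add_old_fiscal_data_alt
  rw [List.foldl_reverse]
  obtain ⟨-, hget⟩ := pvBuildInv backup backup 0 (by simp) (by omega)
  simp only [Nat.cast_zero] at hget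
  have hmatch : ∀ (o : Option (Int × Int)) (acc bl : List String),
      (match o with
       | some ij => PySem.List.slice backup (some ij.1) (some ij.2)
       | none => ([] : List String)) = bl →
      (match o with
       | some ij => acc ++ PySem.List.slice backup (some ij.1) (some ij.2)
       | none => acc) = acc ++ bl := by
    intro o acc bl h
    cases o <;> simp_all
  rw [foldl_block backup _ (fun acc line => pvInnerA_false line backup acc),
      foldl_block backup _ (fun acc line => hmatch _ acc _ (hget line))]
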